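-- pv_equiv track=rewrite | github.com/cherish3503/baekjoon | croatiaAl.py | countCroatiaAl
-- ===== SOURCE A (Python) =====
-- def countCroatiaAl(ipStr):
--     count = 0
--     for i in range(len(ipStr)):
--         count += 1
--
--         if len(ipStr) - i > 1:
--             if ipStr[i] == 'c':
--                 if ipStr[i+1] == '=':
--                     count-=1
--                 elif ipStr[i+1] == '-':
--                     count-=1
--
--             elif ipStr[i] == 'd':
--                 if ipStr[i+1] == 'z':
--                     if (len(ipStr) - i > 2) and (ipStr[i+2] == '=') :
--                         count-=1 #z=
--
--                 elif ipStr[i+1] == '-':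
--                     count-=1
--
--             elif ipStr[i] == 'l':
--                 if ipStr[i+1] == 'j':
--                     count-=1
--
--             elif ipStr[i] == 'n':
--                 if ipStr[i+1] == 'j':
--                     count-=1
--
--             elif ipStr[i] == 's':
--                 if ipStr[i+1] == '=':
--                     count-=1
--
--             elif ipStr[i] == 'z':
--                 if ipStr[i+1] == '=':
--                     count-=1
--
--
--
--
--     return count
-- ===== SOURCE B (Python) =====
-- def countCroatiaAl(ipStr):
--     count = 0
--     i = 0
--     n = len(ipStr)
--     while i < n:
--         if ipStr[i:i+3] == 'dz=':
--             i += 3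
--         elif ipStr[i:i+2] in ('c=', 'c-', 'd-', 'lj', 'nj', 's=', 'z='):
--             i += 2
--         else:
--             i += 1
--         count += 1
--     return count
-- ===== Notes on version B (the rewrite author's own statement) =====
-- stated objective: simpler
-- what changed: A counts every index and subtracts one at each position where a two- or three-character Croatian token starts (a per-position scan-and-subtract state machine); B is a greedy tokenizer that consumes each Croatian token (the three-character token first, then the seven two-character tokens, else a single character) as a whole and counts tokens.
import Mathlib
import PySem

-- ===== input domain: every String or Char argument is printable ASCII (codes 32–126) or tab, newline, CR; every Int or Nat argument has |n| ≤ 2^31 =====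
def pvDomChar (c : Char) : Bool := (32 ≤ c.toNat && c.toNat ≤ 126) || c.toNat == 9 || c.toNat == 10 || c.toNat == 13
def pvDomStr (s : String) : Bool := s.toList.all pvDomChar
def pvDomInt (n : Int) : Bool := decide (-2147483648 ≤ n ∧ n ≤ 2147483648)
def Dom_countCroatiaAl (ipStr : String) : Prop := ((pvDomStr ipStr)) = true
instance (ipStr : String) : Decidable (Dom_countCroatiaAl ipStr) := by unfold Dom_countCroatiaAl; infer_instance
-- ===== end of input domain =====

-- B replaces A's per-index scan (count every position, then subtract one where a two- or three-character
-- Croatian token starts) by a greedy tokenizer that consumes each token as a whole and counts tokens; objective: simpler.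

-- ===== PORT A =====
-- loop body of A's `for i in range(len(ipStr))`, transliterated branch for branch
def pvBodyA (s : List Char) (n : Int) (count i : Int) : Int :=
  let count := count + 1
  if n - i > 1 then
    if PySem.List.pyGetD s i ' ' = 'c' then
      if PySem.List.pyGetD s (i+1) ' ' = '=' then count - 1
      else if PySem.List.pyGetD s (i+1) ' ' = '-' then count - 1
      else count
    else if PySem.List.pyGetD s i ' ' = 'd' then
      if PySem.List.pyGetD s (i+1) ' ' = 'z' then
        if n - i > 2 ∧ PySem.List.pyGetD s (i+2) ' ' = '=' then count - 1 else count
      else if PySem.List.pyGetD s (i+1) ' ' = '-' then count - 1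
      else count
    else if PySem.List.pyGetD s i ' ' = 'l' then
      if PySem.List.pyGetD s (i+1) ' ' = 'j' then count - 1 else count
    else if PySem.List.pyGetD s i ' ' = 'n' then
      if PySem.List.pyGetD s (i+1) ' ' = 'j' then count - 1 else count
    else if PySem.List.pyGetD s i ' ' = 's' then
      if PySem.List.pyGetD s (i+1) ' ' = '=' then count - 1 else count
    else if PySem.List.pyGetD s i ' ' = 'z' then
      if PySem.List.pyGetD s (i+1) ' ' = '=' then count - 1 else count
    else count
  else count

def countCroatiaAl (ipStr : String) : Int :=
  let s := ipStr.toList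
  List.foldl (pvBodyA s (PySem.Str.len ipStr)) 0 (PySem.List.pyRange 0 (PySem.Str.len ipStr))

-- ===== PORT B =====
-- the seven two-character tokens of Source B's tuple, in order
def pvTokens2 : List (List Char) :=
  [['c','='], ['c','-'], ['d','-'], ['l','j'], ['n','j'], ['s','='], ['z','=']]

-- Source B's while loop: greedy token consumption (slice compares), one count per token
def pvTok : List Char → Int
  | [] => 0
  | c :: t =>
    if List.take 3 (c :: t) = ['d','z','='] then pvTok (t.drop 2) + 1
    else if pvTokens2.contains (List.take 2 (c :: t)) then pvTok (t.drop 1) + 1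
    else pvTok t + 1
termination_by l => l.length
decreasing_by all_goals simp

def countCroatiaAl_alt (ipStr : String) : Int := pvTok ipStr.toList

-- ===== PRECONDITION & SPEC =====
def Spec_countCroatiaAl (ipStr : String) (out : Int) : Prop := out = countCroatiaAl_alt ipStr
instance (ipStr : String) (out : Int) : Decidable (Spec_countCroatiaAl ipStr out) := by unfold Spec_countCroatiaAl; infer_instance

-- ===== CLAIM (what is proved, stated in full; the proofs are below) =====
def Claim_equal_countCroatiaAl : Prop := ∀ (ipStr : String), Dom_countCroatiaAl ipStr → Spec_countCroatiaAl ipStr (countCroatiaAl ipStr)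

-- ===== LEMMAS AND PROOFS =====

-- net contribution of A's loop iteration at a position whose suffix is d
def pvContrib (d : List Char) : Int :=
  if 1 < d.length then
    if d.getD 0 ' ' = 'c' then
      if d.getD 1 ' ' = '=' then 0
      else if d.getD 1 ' ' = '-' then 0
      else 1
    else if d.getD 0 ' ' = 'd' then
      if d.getD 1 ' ' = 'z' then
        if 2 < d.length ∧ d.getD 2 ' ' = '=' then 0 else 1
      else if d.getD 1 ' ' = '-' then 0
      else 1
    else if d.getD 0 ' ' = 'l' then
      if d.getD 1 ' ' = 'j' then 0 else 1
    else if d.getD 0 ' ' = 'n' then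
      if d.getD 1 ' ' = 'j' then 0 else 1
    else if d.getD 0 ' ' = 's' then
      if d.getD 1 ' ' = '=' then 0 else 1
    else if d.getD 0 ' ' = 'z' then
      if d.getD 1 ' ' = '=' then 0 else 1
    else 1
  else 1

-- A's total as a sum of contributions over the suffixes
def pvCountA : List Char → Int
  | [] => 0
  | c :: t => pvContrib (c :: t) + pvCountA t

lemma pvBodyA_eq (s : List Char) (k : Nat) (c : Int) (hk : k < s.length) :
    pvBodyA s (s.length : Int) c (k : Int) = c + pvContrib (s.drop k) := by
  have h1 : ((s.length : Int) - (k : Int) > 1) ↔ (1 < (s.drop k).length) := by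
    simp [List.length_drop]; omega
  have h2 : ((s.length : Int) - (k : Int) > 2) ↔ (2 < (s.drop k).length) := by
    simp [List.length_drop]; omega
  have e0 : PySem.List.pyGetD s (k : Int) ' ' = (s.drop k).getD 0 ' ' := by
    rw [PySem.List.pyGetD_natCast]
    simp [List.getD, List.getElem?_drop]
  have e1 : PySem.List.pyGetD s ((k : Int) + 1) ' ' = (s.drop k).getD 1 ' ' := by
    rw [show ((k : Int) + 1) = ((k + 1 : Nat) : Int) by push_cast; ring,
      PySem.List.pyGetD_natCast]
    simp [List.getD, List.getElem?_drop]
  have e2 : PySem.List.pyGetD s ((k : Int) + 2) ' ' = (s.drop k).getD 2 ' ' := by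
    rw [show ((k : Int) + 2) = ((k + 2 : Nat) : Int) by push_cast; ring,
      PySem.List.pyGetD_natCast]
    simp [List.getD, List.getElem?_drop]
  simp only [pvBodyA, pvContrib, e0, e1, e2, h1, h2]
  split_ifs <;> omega

lemma pvFoldl_eq (s : List Char) :
    ∀ (m k : Nat) (c : Int), s.length - k = m →
      List.foldl (pvBodyA s (s.length : Int)) c (PySem.List.pyRange (k : Int) (s.length : Int))
        = c + pvCountA (s.drop k) := by
  intro m
  induction m with
  | zero =>
    intro k c hm
    have hk : (s.length : Int) ≤ (k : Int) := by omega
    rw [PySem.List.pyRange_one_eq_nil hk]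
    have hnil : s.drop k = [] := List.drop_eq_nil_of_le (by omega)
    simp [hnil, pvCountA]
  | succ m ih =>
    intro k c hm
    have hk : (k : Int) < (s.length : Int) := by omega
    have hkn : k < s.length := by omega
    rw [PySem.List.pyRange_one_cons hk, List.foldl_cons, pvBodyA_eq s k c hkn,
      show ((k : Int) + 1) = ((k + 1 : Nat) : Int) by push_cast; ring,
      ih (k + 1) _ (by omega)]
    conv_rhs => rw [List.drop_eq_getElem_cons hkn, pvCountA]
    rw [show s.drop k = s[k] :: s.drop (k + 1) from List.drop_eq_getElem_cons hkn]
    ring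

lemma pvContrib_notok (c : Char) (t : List Char)
    (h3 : ¬ List.take 3 (c :: t) = ['d','z','='])
    (h2 : ¬ pvTokens2.contains (List.take 2 (c :: t)) = true) :
    pvContrib (c :: t) = 1 := by
  match t with
  | [] => simp [pvContrib]
  | [x] =>
    simp only [pvTokens2, List.take, List.contains, List.elem_cons, List.elem_nil] at h2
    simp only [pvContrib, List.getD, List.length_cons, List.getElem?_cons_zero,
      List.getElem?_cons_succ, Option.getD_some]
    split_ifs <;> first | rfl | (exfalso; simp_all)
  | x :: y :: u =>
    simp only [pvTokens2, List.take, List.contains, List.elem_cons, List.elem_nil] at h2 h3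
    simp only [pvContrib, List.getD, List.length_cons, List.getElem?_cons_zero,
      List.getElem?_cons_succ, Option.getD_some]
    split_ifs <;> first | rfl | (exfalso; simp_all)

lemma pvTok_eq_countA : ∀ (l : List Char), pvTok l = pvCountA l := by
  intro l
  fun_induction pvTok l with
  | case1 => rfl
  | case2 c t h ih =>
    match t, h with
    | x :: y :: u, h =>
      simp only [List.take, List.cons.injEq] at h
      obtain ⟨hc, hx, hy, -⟩ := h
      subst hc; subst hx; subst hy
      simp only [List.drop] at ih
      simp [pvCountA, pvContrib, ih]
      ring
  | case3 c t h3 h2 ih =>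
    match t, h2 with
    | [], h2 => simp [pvTokens2, List.take] at h2
    | x :: u, h2 =>
      simp [pvTokens2, List.take] at h2
      simp only [List.drop] at ih
      rcases h2 with ⟨hc,hx⟩|⟨hc,hx⟩|⟨hc,hx⟩|⟨hc,hx⟩|⟨hc,hx⟩|⟨hc,hx⟩|⟨hc,hx⟩ <;> subst_vars <;>
        simp [pvCountA, pvContrib, ih] <;> ring
  | case4 c t h3 h2 ih =>
    rw [pvCountA, pvContrib_notok c t h3 h2, ih]; ring

lemma pv_main (ipStr : String) : countCroatiaAl ipStr = countCroatiaAl_alt ipStr := by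
  show List.foldl (pvBodyA ipStr.toList (PySem.Str.len ipStr)) 0
      (PySem.List.pyRange 0 (PySem.Str.len ipStr)) = pvTok ipStr.toList
  have hlen : PySem.Str.len ipStr = (ipStr.toList.length : Int) := by
    simp [PySem.Str.len_eq]
  rw [hlen]
  simpa [pvTok_eq_countA] using
    pvFoldl_eq ipStr.toList (ipStr.toList.length) 0 0 (by omega)

-- ===== VERDICT (by name: the statement is the Claim_ definition above) =====
theorem countCroatiaAl_spec : Claim_equal_countCroatiaAl := by
  intro ipStr _
  unfold Spec_countCroatiaAl
  exact pv_main ipStr
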